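-- pv_equiv track=rewrite | github.com/pilyeooong/algorithm | daily/240206.py | find_white_spaces_width
-- ===== SOURCE A (Python) =====
-- from collections import deque
--
-- def find_white_spaces_width(v):
--     row = len(v)
--     col = len((v[0]))
--
--     visited = [[False] * col for _ in range(row)]
--
--     def bfs(x, y):
--         q = deque()
--         q.append((x, y))
--         visited[x][y] = True
--         count = 1
--
--         deltas = [(-1, 0), (1, 0), (0, -1), (0, 1)]
--
--         while q:
--             cur_x, cur_y = q.popleft()
--
--             for dx, dy in deltas:
--                 next_x, next_y = cur_x + dx, cur_y + dy
--
--                 if next_x >= 0 and next_x < row and next_y >= 0 and next_y < col and v[next_x][next_y] == 1 and visited[next_x][next_y] == False: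
--                     q.append((next_x, next_y))
--                     visited[next_x][next_y] = 1
--                     count += 1
--         return count
--
--     width_list = []
--     for x in range(row):
--         for y in range(col):
--             if v[x][y] == 1 and visited[x][y] == False:
--                 width = bfs(x, y)
--                 width_list.append(width)
--
--     return [len(width_list), max(width_list)] # 영역의 갯수와, 영역 최대 넓이를 반환한다.
-- ===== SOURCE B (Python) =====
-- def find_white_spaces_width(v):
--     row = len(v)
--     col = len(v[0])
--
--     # union-find with eager full relabeling: rep maps each 1-cell to the
--     # canonical cell of its component (no parent chains, O(1) lookup)
--     rep = {}
--     for x in range(row):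
--         for y in range(col):
--             if v[x][y] == 1:
--                 rep[(x, y)] = (x, y)
--                 for nx, ny in ((x - 1, y), (x, y - 1)):
--                     if nx >= 0 and ny >= 0 and v[nx][ny] == 1:
--                         a, b = rep[(x, y)], rep[(nx, ny)]
--                         if a != b:
--                             for k in rep:
--                                 if rep[k] == a:
--                                     rep[k] = b
--
--     sizes = {}
--     for x in range(row):
--         for y in range(col):
--             if v[x][y] == 1:
--                 r = rep[(x, y)]
--                 sizes[r] = sizes.get(r, 0) + 1
--
--     counts = list(sizes.values())
--     return [len(counts), max(counts)]
-- ===== Notes on version B (the rewrite author's own statement) =====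
-- stated objective: alternative
-- what changed: A's per-component BFS flood fill (deque + visited matrix) is replaced by a single row-major scan building a union-find with eager relabeling (each 1-cell merged with its up/left neighbours), followed by a dictionary count of component sizes per representative.
-- outside the precondition, e.g. on find_white_spaces_width([[0, 0], [0, 0]]): A raises ValueError, B raises ValueError; on find_white_spaces_width([]): A raises IndexError, B raises IndexError; on find_white_spaces_width([[1, 1], [1]]): A raises IndexError, B raises IndexError
import Mathlib
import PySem

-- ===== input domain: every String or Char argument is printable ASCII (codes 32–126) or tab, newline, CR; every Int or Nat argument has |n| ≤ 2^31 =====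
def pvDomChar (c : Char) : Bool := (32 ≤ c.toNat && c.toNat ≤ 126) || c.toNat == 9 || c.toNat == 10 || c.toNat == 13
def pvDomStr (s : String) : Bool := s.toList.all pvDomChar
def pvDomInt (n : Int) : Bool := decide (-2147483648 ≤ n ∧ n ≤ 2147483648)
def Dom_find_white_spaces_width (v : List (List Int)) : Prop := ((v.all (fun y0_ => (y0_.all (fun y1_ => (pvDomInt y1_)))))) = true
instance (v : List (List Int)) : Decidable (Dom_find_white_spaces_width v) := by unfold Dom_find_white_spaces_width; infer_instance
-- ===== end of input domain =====

-- B replaces A's BFS flood fill by a union-find with eager relabeling over the scanned cells: an alternative algorithm of similar cost.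


-- ===== PORT A =====
-- v[x][y] for 0 ≤ x < len(v), 0 ≤ y < len(row x): exact there (all call sites are guarded; Pre_ makes the guarded rows long enough)
def pvAt (v : List (List Int)) (x y : Int) : Int :=
  PySem.List.pyGetD (PySem.List.pyGetD v x []) y 0

-- visited[x][y] read / write; call sites guarantee 0 ≤ x, y, so .toNat is exact
def pvVget (m : List (List Bool)) (x y : Int) : Bool :=
  PySem.List.pyGetD (PySem.List.pyGetD m x []) y false

def pvVset (m : List (List Bool)) (x y : Int) : List (List Bool) :=
  m.set x.toNat ((m.getD x.toNat []).set y.toNat true)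

-- one iteration of the `for dx, dy in deltas` body; state = (q, visited, count)
def pvBfsStep (v : List (List Int)) (row col cx cy : Int)
    (st : List (Int × Int) × List (List Bool) × Int) (d : Int × Int) :
    List (Int × Int) × List (List Bool) × Int :=
  let nx := cx + d.1
  let ny := cy + d.2
  if 0 ≤ nx ∧ nx < row ∧ 0 ≤ ny ∧ ny < col ∧ pvAt v nx ny = 1 ∧ pvVget st.2.1 nx ny = false then
    (st.1 ++ [(nx, ny)], pvVset st.2.1 nx ny, st.2.2 + 1)
  else st

-- the `while q:` loop; fuel only makes the recursion structural (never exhausted on the guarded calls)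
def pvBfsLoop (v : List (List Int)) (row col : Int) :
    Nat → List (Int × Int) → List (List Bool) → Int → List (List Bool) × Int
  | 0, _, vis, cnt => (vis, cnt)
  | _ + 1, [], vis, cnt => (vis, cnt)
  | fuel + 1, c :: q, vis, cnt =>
      let st := [((-1 : Int), (0 : Int)), (1, 0), (0, -1), (0, 1)].foldl
        (pvBfsStep v row col c.1 c.2) (q, vis, cnt)
      pvBfsLoop v row col fuel st.1 st.2.1 st.2.2

def pvBfs (v : List (List Int)) (row col x y : Int) (vis : List (List Bool)) :
    List (List Bool) × Int :=
  pvBfsLoop v row col (row.toNat * col.toNat * 5 + 5) [(x, y)] (pvVset vis x y) 1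

def find_white_spaces_width (v : List (List Int)) : List Int :=
  let row : Int := v.length
  let col : Int := (v.headD []).length    -- len(v[0]): IndexError on [] is excluded by Pre_
  let vis0 := List.replicate row.toNat (List.replicate col.toNat false)
  let st := (PySem.List.pyRange 0 row 1).foldl (fun st x =>
      (PySem.List.pyRange 0 col 1).foldl (fun (st : List Int × List (List Bool)) y =>
        if pvAt v x y = 1 ∧ pvVget st.2 x y = false then
          let r := pvBfs v row col x y st.2
          (st.1 ++ [r.2], r.1)
        else st) st) ([], vis0)
  [st.1.length, (PySem.List.max? st.1 (fun z => z)).getD 0]   -- max([]) (ValueError) excluded by Pre_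

-- ===== PORT B =====
-- `for k in rep: if rep[k] == a: rep[k] = b` — rewrite every value a to b, keys unchanged
def pvRelabel (r : PySem.Dict (Int × Int) (Int × Int)) (a b : Int × Int) :
    PySem.Dict (Int × Int) (Int × Int) :=
  PySem.Dict.mk (r.items.map (fun kv => (kv.1, if kv.2 = a then b else kv.2)))

def find_white_spaces_width_alt (v : List (List Int)) : List Int :=
  let row : Int := v.length
  let col : Int := (v.headD []).length
  let rep := (PySem.List.pyRange 0 row 1).foldl (fun rep x =>
      (PySem.List.pyRange 0 col 1).foldl (fun (rep : PySem.Dict (Int × Int) (Int × Int)) y =>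
        if pvAt v x y = 1 then
          let rep1 := rep.insert (x, y) (x, y)
          [(x - 1, y), (x, y - 1)].foldl (fun rep2 n =>
            if 0 ≤ n.1 ∧ 0 ≤ n.2 ∧ pvAt v n.1 n.2 = 1 then
              let a := (rep2.get? (x, y)).getD (x, y)   -- rep[(x,y)]: key present (just inserted)
              let b := (rep2.get? n).getD n             -- rep[(nx,ny)]: key present (scanned earlier)
              if a ≠ b then pvRelabel rep2 a b else rep2
            else rep2) rep1
        else rep) rep) (PySem.Dict.mk [])
  let sizes := (PySem.List.pyRange 0 row 1).foldl (fun s x =>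
      (PySem.List.pyRange 0 col 1).foldl (fun (s : PySem.Dict (Int × Int) Int) y =>
        if pvAt v x y = 1 then
          let r := (rep.get? (x, y)).getD (x, y)
          s.insert r (s.getD r 0 + 1)
        else s) s) (PySem.Dict.mk [])
  let counts := sizes.values
  [counts.length, (PySem.List.max? counts (fun z => z)).getD 0]

-- ===== PRECONDITION & SPEC =====
-- Pre_ excludes exactly the inputs where A raises: the empty grid (IndexError on v[0]),
-- grids with a row shorter than len(v[0]) (IndexError in the scan), and grids with no 1
-- in the scanned columns (ValueError from max([])).
def Pre_find_white_spaces_width (v : List (List Int)) : Prop :=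
  v ≠ [] ∧ (∀ r ∈ v, (v.headD []).length ≤ r.length) ∧
    ∃ r ∈ v, 1 ∈ r.take (v.headD []).length

instance (v : List (List Int)) : Decidable (Pre_find_white_spaces_width v) := by
  unfold Pre_find_white_spaces_width; infer_instance

def pvWitness_find_white_spaces_width : List (List Int) := [[1, 0], [0, 1]]

def Spec_find_white_spaces_width (v : List (List Int)) (out : List Int) : Prop := out = find_white_spaces_width_alt v
instance (v : List (List Int)) (out : List Int) : Decidable (Spec_find_white_spaces_width v out) := by unfold Spec_find_white_spaces_width; infer_instance

-- ===== CLAIM (what is proved, stated in full; the proofs are below) =====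
def Claim_equal_find_white_spaces_width : Prop := ∀ (v : List (List Int)), Dom_find_white_spaces_width v → Pre_find_white_spaces_width v → Spec_find_white_spaces_width v (find_white_spaces_width v)

-- ===== LEMMAS AND PROOFS =====

-- ===== proof-only definitions =====

def pvR (v : List (List Int)) : Int := (v.length : Int)
def pvC (v : List (List Int)) : Int := ((v.headD []).length : Int)

def pvInGrid (v : List (List Int)) (p : Int × Int) : Prop :=
  0 ≤ p.1 ∧ p.1 < pvR v ∧ 0 ≤ p.2 ∧ p.2 < pvC v

def pvOne (v : List (List Int)) (p : Int × Int) : Prop :=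
  pvInGrid v p ∧ pvAt v p.1 p.2 = 1

def pvAdj (v : List (List Int)) (p q : Int × Int) : Prop :=
  pvOne v p ∧ pvOne v q ∧
    ((q.1 = p.1 - 1 ∧ q.2 = p.2) ∨ (q.1 = p.1 + 1 ∧ q.2 = p.2) ∨
     (q.1 = p.1 ∧ q.2 = p.2 - 1) ∨ (q.1 = p.1 ∧ q.2 = p.2 + 1))

def pvConn (v : List (List Int)) : Int × Int → Int × Int → Prop :=
  Relation.ReflTransGen (pvAdj v)

def pvRmCells (v : List (List Int)) : List (Int × Int) :=
  (PySem.List.pyRange 0 (pvR v) 1).flatMap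
    (fun x => (PySem.List.pyRange 0 (pvC v) 1).map (fun y => (x, y)))

def pvOnes (v : List (List Int)) : List (Int × Int) :=
  (pvRmCells v).filter (fun p => decide (pvAt v p.1 p.2 = 1))

noncomputable def pvComp (v : List (List Int)) (p : Int × Int) : List (Int × Int) :=
  (pvOnes v).filter (fun q => @decide _ (Classical.propDecidable (pvConn v p q)))

def pvRmLt (p q : Int × Int) : Prop := p.1 < q.1 ∨ (p.1 = q.1 ∧ p.2 < q.2)
def pvRmLe (p q : Int × Int) : Prop := p.1 < q.1 ∨ (p.1 = q.1 ∧ p.2 ≤ q.2)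

def pvIsFirst (v : List (List Int)) (p : Int × Int) : Prop :=
  ∀ q, pvConn v p q → pvRmLe p q

noncomputable def pvCanon (v : List (List Int)) : List Int :=
  ((pvOnes v).filter (fun p => @decide _ (Classical.propDecidable (pvIsFirst v p)))).map
    (fun p => ((pvComp v p).length : Int))

-- ===== basic facts =====

theorem pvAdj_symm (v : List (List Int)) : Symmetric (pvAdj v) := by
  intro p q ⟨hp, hq, h⟩
  exact ⟨hq, hp, by omega⟩

theorem pvConn_symm (v : List (List Int)) {p q : Int × Int} (h : pvConn v p q) :
    pvConn v q p := Relation.ReflTransGen.symmetric (pvAdj_symm v) h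

theorem pvAdj_ne (v : List (List Int)) {p q : Int × Int} (h : pvAdj v p q) : p ≠ q := by
  obtain ⟨_, _, h⟩ := h
  intro he; subst he; omega

theorem pvConn_one_of_ne (v : List (List Int)) {p q : Int × Int}
    (h : pvConn v p q) (hne : p ≠ q) : pvOne v p ∧ pvOne v q := by
  induction h with
  | refl => exact absurd rfl hne
  | tail hsteps hstep ih =>
    rename_i b c
    rcases hsteps.cases_head with h0 | ⟨e, he, _⟩
    · subst h0; exact ⟨hstep.1, hstep.2.1⟩
    · exact ⟨he.1, hstep.2.1⟩

theorem mem_pvRmCells (v : List (List Int)) (p : Int × Int) :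
    p ∈ pvRmCells v ↔ pvInGrid v p := by
  simp [pvRmCells, List.mem_flatMap, PySem.List.mem_pyRange_one, pvInGrid]
  constructor
  · rintro ⟨x, ⟨hx0, hx1⟩, y, ⟨hy0, hy1⟩, rfl⟩; exact ⟨hx0, hx1, hy0, hy1⟩
  · rintro ⟨h1, h2, h3, h4⟩; exact ⟨p.1, ⟨h1, h2⟩, p.2, ⟨h3, h4⟩, rfl⟩

theorem mem_pvOnes (v : List (List Int)) (p : Int × Int) :
    p ∈ pvOnes v ↔ pvOne v p := by
  simp [pvOnes, List.mem_filter, mem_pvRmCells, pvOne]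

theorem pvRmCells_pairwise (v : List (List Int)) : (pvRmCells v).Pairwise pvRmLt := by
  unfold pvRmCells
  apply List.pairwise_flatMap.2
  constructor
  · intro x _
    apply List.Pairwise.map
    · intro a b hab
      exact Or.inr ⟨rfl, hab⟩
    · exact PySem.List.pairwise_lt_pyRange_one 0 (pvC v)
  · have := PySem.List.pairwise_lt_pyRange_one 0 (pvR v)
    apply this.imp
    intro a b hab
    intro p hp q hq
    simp at hp hq
    obtain ⟨_, _, rfl⟩ := hp
    obtain ⟨_, _, rfl⟩ := hq
    exact Or.inl hab

theorem pvRmLt_asymm {p q : Int × Int} (h : pvRmLt p q) : ¬ pvRmLt q p := by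
  unfold pvRmLt at *; omega

theorem pvRmLt_irrefl (p : Int × Int) : ¬ pvRmLt p p := by unfold pvRmLt; omega

theorem pvRmCells_nodup (v : List (List Int)) : (pvRmCells v).Nodup :=
  (pvRmCells_pairwise v).imp (fun h => by intro he; subst he; exact pvRmLt_irrefl _ h)

theorem pvOnes_nodup (v : List (List Int)) : (pvOnes v).Nodup :=
  (pvRmCells_nodup v).filter _

theorem pvOnes_pairwise (v : List (List Int)) : (pvOnes v).Pairwise pvRmLt :=
  (pvRmCells_pairwise v).filter _

theorem pvComp_nodup (v : List (List Int)) (p : Int × Int) : (pvComp v p).Nodup :=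
  (pvOnes_nodup v).filter _

theorem mem_pvComp (v : List (List Int)) (p q : Int × Int) :
    q ∈ pvComp v p ↔ pvOne v q ∧ pvConn v p q := by
  simp only [pvComp, List.mem_filter, mem_pvOnes, decide_eq_true_eq]

-- ===== visited-matrix abstraction =====

def pvWf (v : List (List Int)) (m : List (List Bool)) : Prop :=
  m.length = v.length ∧ ∀ r ∈ m, r.length = (v.headD []).length

def pvVisAbs (v : List (List Int)) (m : List (List Bool)) (W : Int × Int → Prop) : Prop :=
  pvWf v m ∧ ∀ p : Int × Int, pvInGrid v p → (pvVget m p.1 p.2 = true ↔ W p)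

theorem pvVget_eq (m : List (List Bool)) (x y : Int) (hx : 0 ≤ x) (hy : 0 ≤ y) :
    pvVget m x y = (m.getD x.toNat []).getD y.toNat false := by
  simp [pvVget, PySem.List.pyGetD_of_nonneg _ _ hx, PySem.List.pyGetD_of_nonneg _ _ hy]

theorem pvWf_vset (v : List (List Int)) (m : List (List Bool)) (x y : Int)
    (h : pvWf v m) : pvWf v (pvVset m x y) := by
  obtain ⟨h1, h2⟩ := h
  by_cases hx : x.toNat < m.length
  · refine ⟨by simp [pvVset, h1], ?_⟩
    intro r hr
    rcases List.mem_or_eq_of_mem_set hr with hr' | rfl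
    · exact h2 _ hr'
    · rw [List.length_set]
      apply h2
      have : m.getD x.toNat [] = m[x.toNat] := by
        simp [List.getD_eq_getElem?_getD, List.getElem?_eq_getElem hx]
      rw [this]
      exact List.getElem_mem _
  · unfold pvVset
    rw [List.set_eq_of_length_le (by omega)]
    exact ⟨h1, h2⟩

theorem pvVget_vset_self (v : List (List Int)) (m : List (List Bool)) (x y : Int)
    (h : pvWf v m) (hg : pvInGrid v (x, y)) : pvVget (pvVset m x y) x y = true := by
  obtain ⟨hgx0, hgx1, hgy0, hgy1⟩ := hg
  obtain ⟨h1, h2⟩ := h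
  simp only [pvR, pvC] at hgx1 hgy1
  have hx : x.toNat < m.length := by omega
  have hrow : (m.getD x.toNat []).length = (v.headD []).length := by
    apply h2
    have : m.getD x.toNat [] = m[x.toNat] := by
      simp [List.getD_eq_getElem?_getD, List.getElem?_eq_getElem hx]
    rw [this]; exact List.getElem_mem _
  have hy : y.toNat < (m.getD x.toNat []).length := by omega
  rw [pvVget_eq _ _ _ hgx0 hgy0]
  unfold pvVset
  have hmx : m.getD x.toNat [] = m[x.toNat] := by
    simp [List.getD_eq_getElem?_getD, List.getElem?_eq_getElem hx]
  have hy' : y.toNat < m[x.toNat].length := by rw [← hmx]; exact hy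
  simp only [List.getD_eq_getElem?_getD, List.getElem?_set_self hx, Option.getD_some,
    List.getElem?_eq_getElem hx]
  simp [hy']

theorem pvVget_vset_ne (m : List (List Bool)) (x y a b : Int)
    (hx : 0 ≤ x) (hy : 0 ≤ y) (ha : 0 ≤ a) (hb : 0 ≤ b)
    (hne : (a, b) ≠ (x, y)) : pvVget (pvVset m x y) a b = pvVget m a b := by
  rw [pvVget_eq _ _ _ ha hb, pvVget_eq _ _ _ ha hb]
  unfold pvVset
  by_cases hax : a.toNat = x.toNat
  · have hax' : a = x := by omega
    have hby : b ≠ y := by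
      intro hby; exact hne (by rw [hax', hby])
    have hby' : b.toNat ≠ y.toNat := by omega
    subst hax'
    by_cases hlt : a.toNat < m.length
    · simp only [List.getD_eq_getElem?_getD, List.getElem?_set_self hlt,
        List.getElem?_eq_getElem hlt, Option.getD_some]
      rw [List.getElem?_set_ne (show y.toNat ≠ b.toNat by omega)]
    · rw [List.set_eq_of_length_le (by omega)]
  · simp [List.getD_eq_getElem?_getD, List.getElem?_set_ne (show x.toNat ≠ a.toNat by omega)]

theorem pvVisAbs_vset (v : List (List Int)) (m : List (List Bool)) (W : Int × Int → Prop)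
    (p : Int × Int) (h : pvVisAbs v m W) (hg : pvInGrid v p) :
    pvVisAbs v (pvVset m p.1 p.2) (fun q => W q ∨ q = p) := by
  obtain ⟨hwf, habs⟩ := h
  refine ⟨pvWf_vset v m _ _ hwf, ?_⟩
  intro q hq
  by_cases hqp : q = p
  · subst hqp
    simp only [pvVget_vset_self v m _ _ hwf (by exact hg)]
    simp
  · rw [pvVget_vset_ne m p.1 p.2 q.1 q.2 hg.1 hg.2.2.1 hq.1 hq.2.2.1
      (by intro hc; exact hqp (Prod.ext_iff.2 ⟨congrArg Prod.fst hc, congrArg Prod.snd hc⟩))]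
    rw [habs q hq]
    simp [hqp]

theorem pvVisAbs_vis0 (v : List (List Int)) :
    pvVisAbs v (List.replicate (pvR v).toNat (List.replicate (pvC v).toNat false))
      (fun _ => False) := by
  refine ⟨⟨by simp [pvR], ?_⟩, ?_⟩
  · intro r hr
    rw [List.eq_of_mem_replicate hr]
    simp [pvC]
  · intro p hp
    obtain ⟨h1, h2, h3, h4⟩ := hp
    rw [pvVget_eq _ _ _ h1 h3]
    have hx : p.1.toNat < (pvR v).toNat := by omega
    have hy : p.2.toNat < (pvC v).toNat := by omega
    simp [List.getD_eq_getElem?_getD, List.getElem?_replicate, hx, hy]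

-- ===== BFS correctness =====

theorem pvVisAbs_congr (v : List (List Int)) (m : List (List Bool)) (W W' : Int × Int → Prop)
    (h : pvVisAbs v m W) (hiff : ∀ p, W p ↔ W' p) : pvVisAbs v m W' :=
  ⟨h.1, fun p hp => (h.2 p hp).trans (hiff p)⟩

def pvDeltas : List (Int × Int) := [(-1, 0), (1, 0), (0, -1), (0, 1)]

theorem pvAdj_of_delta (v : List (List Int)) (c d : Int × Int) (hd : d ∈ pvDeltas)
    (hc : pvOne v c) (hn : pvOne v (c.1 + d.1, c.2 + d.2)) :
    pvAdj v c (c.1 + d.1, c.2 + d.2) := by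
  refine ⟨hc, hn, ?_⟩
  simp [pvDeltas] at hd
  rcases hd with rfl | rfl | rfl | rfl <;> simp <;> omega

theorem pvAdj_delta_cases (v : List (List Int)) (c b : Int × Int) (h : pvAdj v c b) :
    ∃ d ∈ pvDeltas, b = (c.1 + d.1, c.2 + d.2) := by
  obtain ⟨_, _, hd⟩ := h
  rcases hd with h | h | h | h
  · exact ⟨(-1, 0), by simp [pvDeltas], by obtain ⟨h1, h2⟩ := h; exact Prod.ext (by omega) (by omega)⟩
  · exact ⟨(1, 0), by simp [pvDeltas], by obtain ⟨h1, h2⟩ := h; exact Prod.ext (by omega) (by omega)⟩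
  · exact ⟨(0, -1), by simp [pvDeltas], by obtain ⟨h1, h2⟩ := h; exact Prod.ext (by omega) (by omega)⟩
  · exact ⟨(0, 1), by simp [pvDeltas], by obtain ⟨h1, h2⟩ := h; exact Prod.ext (by omega) (by omega)⟩

theorem pvBfsStep_foldl (v : List (List Int)) (W₀ : Int × Int → Prop) (c : Int × Int)
    (ds : List (Int × Int)) (hds : ∀ d ∈ ds, d ∈ pvDeltas) (hc : pvOne v c) :
    ∀ (q : List (Int × Int)) (m : List (List Bool)) (cnt : Int) (S : List (Int × Int)),
    pvVisAbs v m (fun p => W₀ p ∨ p ∈ S) →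
    S.Nodup →
    cnt = (S.length : Int) →
    ∃ T : List (Int × Int),
      (ds.foldl (pvBfsStep v (pvR v) (pvC v) c.1 c.2) (q, m, cnt)).1 = q ++ T ∧
      (ds.foldl (pvBfsStep v (pvR v) (pvC v) c.1 c.2) (q, m, cnt)).2.2 = cnt + (T.length : Int) ∧
      pvVisAbs v ((ds.foldl (pvBfsStep v (pvR v) (pvC v) c.1 c.2) (q, m, cnt)).2.1)
        (fun p => W₀ p ∨ p ∈ S ++ T) ∧
      (S ++ T).Nodup ∧
      T.length ≤ ds.length ∧
      (∀ t ∈ T, pvAdj v c t ∧ ¬ W₀ t) ∧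
      (∀ d ∈ ds, pvOne v (c.1 + d.1, c.2 + d.2) →
        W₀ (c.1 + d.1, c.2 + d.2) ∨ (c.1 + d.1, c.2 + d.2) ∈ S ++ T) := by
  induction ds with
  | nil =>
    intro q m cnt S habs hnd hcnt
    exact ⟨[], by simp, by simp, by simpa using habs, by simpa using hnd, by simp, by simp, by simp⟩
  | cons d ds ih =>
    intro q m cnt S habs hnd hcnt
    have hdin : d ∈ pvDeltas := hds d (by simp)
    have hds' : ∀ e ∈ ds, e ∈ pvDeltas := fun e he => hds e (by simp [he])
    rw [List.foldl_cons]
    set n : Int × Int := (c.1 + d.1, c.2 + d.2) with hn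
    by_cases hcond : (0 ≤ c.1 + d.1 ∧ c.1 + d.1 < pvR v ∧ 0 ≤ c.2 + d.2 ∧ c.2 + d.2 < pvC v ∧
        pvAt v (c.1 + d.1) (c.2 + d.2) = 1 ∧ pvVget m (c.1 + d.1) (c.2 + d.2) = false)
    · have hstep : pvBfsStep v (pvR v) (pvC v) c.1 c.2 (q, m, cnt) d =
          (q ++ [n], pvVset m n.1 n.2, cnt + 1) := by
        simp only [pvBfsStep, hn]
        rw [if_pos hcond]
      have hnone : pvOne v n := ⟨⟨hcond.1, hcond.2.1, hcond.2.2.1, hcond.2.2.2.1⟩, hcond.2.2.2.2.1⟩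
      have hnfresh : ¬ (W₀ n ∨ n ∈ S) := by
        intro hmem
        have := (habs.2 n hnone.1).2 hmem
        rw [hcond.2.2.2.2.2] at this
        exact Bool.false_ne_true this
      have habs' : pvVisAbs v (pvVset m n.1 n.2) (fun p => W₀ p ∨ p ∈ S ++ [n]) := by
        apply pvVisAbs_congr v _ _ _ (pvVisAbs_vset v m _ n habs hnone.1)
        intro p; simp; tauto
      have hnd' : (S ++ [n]).Nodup := by
        refine List.Nodup.append hnd (by simp) ?_
        intro a ha hb
        simp only [List.mem_singleton] at hb
        subst hb
        exact hnfresh (Or.inr ha)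
      obtain ⟨T, h0, h1, h2, h3, h4, h5, h6⟩ :=
        ih hds' (q ++ [n]) (pvVset m n.1 n.2) (cnt + 1) (S ++ [n]) habs' hnd' (by simp [hcnt])
      rw [hstep]
      refine ⟨[n] ++ T, ?_, ?_, ?_, ?_, ?_, ?_, ?_⟩
      · rw [h0]; simp
      · rw [h1]; simp; omega
      · apply pvVisAbs_congr v _ _ _ h2; intro p; rw [List.append_assoc]
      · simpa [List.append_assoc] using h3
      · simp; omega
      · intro t ht
        rcases List.mem_append.1 ht with ht | ht
        · simp at ht; subst ht
          exact ⟨pvAdj_of_delta v c d hdin hc hnone, fun hw => hnfresh (Or.inl hw)⟩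
        · exact h5 t ht
      · intro e he hone
        rcases List.mem_cons.1 he with rfl | he
        · right; simp [hn]
        · rcases h6 e he hone with h | h
          · exact Or.inl h
          · right; rw [← List.append_assoc]; exact h
    · have hstep : pvBfsStep v (pvR v) (pvC v) c.1 c.2 (q, m, cnt) d = (q, m, cnt) := by
        simp only [pvBfsStep]
        rw [if_neg hcond]
      rw [hstep]
      obtain ⟨T, h0, h1, h2, h3, h4, h5, h6⟩ := ih hds' q m cnt S habs hnd hcnt
      refine ⟨T, h0, h1, h2, h3, by simp; omega, h5, ?_⟩
      intro e he hone
      rcases List.mem_cons.1 he with rfl | he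
      · -- the guard failed though the cell is an in-grid 1-cell: it was already visited
        have hv : pvVget m (c.1 + e.1) (c.2 + e.2) = true := by
          rcases Bool.eq_false_or_eq_true (pvVget m (c.1 + e.1) (c.2 + e.2)) with ht | hf
          · exact ht
          · exact absurd ⟨hone.1.1, hone.1.2.1, hone.1.2.2.1, hone.1.2.2.2, hone.2, hf⟩ hcond
        have := (habs.2 _ hone.1).1 hv
        rcases this with hw | hs
        · exact Or.inl hw
        · exact Or.inr (List.mem_append_left _ hs)
      · exact h6 e he hone

theorem pvNotW_of_conn (v : List (List Int)) (W₀ : Int × Int → Prop)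
    (hsat : ∀ a b, W₀ a → pvAdj v a b → W₀ b) (p₀ : Int × Int) (hW0 : ¬ W₀ p₀) :
    ∀ p, pvConn v p₀ p → ¬ W₀ p := by
  intro p h
  induction h with
  | refl => exact hW0
  | tail hab hstep ih =>
    intro hw
    exact ih (hsat _ _ hw (pvAdj_symm v hstep))

theorem pvReach_in (v : List (List Int)) (W₀ : Int × Int → Prop) (p₀ : Int × Int)
    (S : List (Int × Int))
    (hsat : ∀ a b, W₀ a → pvAdj v a b → W₀ b) (hW0 : ¬ W₀ p₀)
    (hclosed : ∀ a ∈ S, ∀ b, pvAdj v a b → W₀ b ∨ b ∈ S) (hp0 : p₀ ∈ S) :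
    ∀ p, pvConn v p₀ p → p ∈ S := by
  intro p h
  induction h with
  | refl => exact hp0
  | tail hab hstep ih =>
    rename_i b c
    rcases hclosed b ih c hstep with hw | hs
    · exact absurd hw (pvNotW_of_conn v W₀ hsat p₀ hW0 c (Relation.ReflTransGen.tail hab hstep))
    · exact hs

theorem pvS_length_le_comp (v : List (List Int)) (p₀ : Int × Int) (S : List (Int × Int))
    (hnd : S.Nodup) (hsub : ∀ s ∈ S, pvOne v s ∧ pvConn v p₀ s) :
    S.length ≤ (pvComp v p₀).length :=
  (List.subperm_of_subset hnd (fun s hs => (mem_pvComp v p₀ s).2 (hsub s hs))).length_le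

theorem pvBfsLoop_spec (v : List (List Int)) (W₀ : Int × Int → Prop) (p₀ : Int × Int)
    (hsat : ∀ a b, W₀ a → pvAdj v a b → W₀ b) (hW0 : ¬ W₀ p₀) :
    ∀ (fuel : Nat) (q S : List (Int × Int)) (m : List (List Bool)) (cnt : Int),
    pvVisAbs v m (fun p => W₀ p ∨ p ∈ S) →
    S.Nodup →
    (∀ s ∈ S, pvOne v s ∧ pvConn v p₀ s ∧ ¬ W₀ s) →
    (∀ c ∈ q, c ∈ S) →
    (∀ a ∈ S, a ∉ q → ∀ b, pvAdj v a b → W₀ b ∨ b ∈ S) →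
    cnt = (S.length : Int) →
    5 * ((pvComp v p₀).length - S.length) + q.length ≤ fuel →
    p₀ ∈ S →
    pvVisAbs v (pvBfsLoop v (pvR v) (pvC v) fuel q m cnt).1
      (fun p => W₀ p ∨ (pvOne v p ∧ pvConn v p₀ p))
    ∧ (pvBfsLoop v (pvR v) (pvC v) fuel q m cnt).2 = ((pvComp v p₀).length : Int) := by
  intro fuel
  induction fuel with
  | zero =>
    intro q S m cnt habs hnd hS hq hclosed hcnt hfuel hp0
    match q with
    | _ :: _ => simp at hfuel
    | [] =>
      have hfin : ∀ a, a ∈ S ↔ a ∈ pvComp v p₀ := by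
        intro a
        constructor
        · intro ha; exact (mem_pvComp v p₀ a).2 ⟨(hS a ha).1, (hS a ha).2.1⟩
        · intro ha
          obtain ⟨_, hconn⟩ := (mem_pvComp v p₀ a).1 ha
          exact pvReach_in v W₀ p₀ S hsat hW0
            (fun a ha b hb => hclosed a ha (by simp) b hb) hp0 a hconn
      have hperm : S.Perm (pvComp v p₀) :=
        (List.perm_ext_iff_of_nodup hnd (pvComp_nodup v p₀)).2 hfin
      constructor
      · simp only [pvBfsLoop]
        apply pvVisAbs_congr v m _ _ habs
        intro p
        constructor
        · rintro (h | h)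
          · exact Or.inl h
          · exact Or.inr ⟨(hS p h).1, (hS p h).2.1⟩
        · rintro (h | h)
          · exact Or.inl h
          · exact Or.inr ((hfin p).2 ((mem_pvComp v p₀ p).2 h))
      · simp only [pvBfsLoop]
        rw [hcnt, hperm.length_eq]
  | succ fuel ih =>
    intro q S m cnt habs hnd hS hq hclosed hcnt hfuel hp0
    match q with
    | [] =>
      -- same termination argument as fuel = 0
      have hfin : ∀ a, a ∈ S ↔ a ∈ pvComp v p₀ := by
        intro a
        constructor
        · intro ha; exact (mem_pvComp v p₀ a).2 ⟨(hS a ha).1, (hS a ha).2.1⟩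
        · intro ha
          obtain ⟨_, hconn⟩ := (mem_pvComp v p₀ a).1 ha
          exact pvReach_in v W₀ p₀ S hsat hW0
            (fun a ha b hb => hclosed a ha (by simp) b hb) hp0 a hconn
      have hperm : S.Perm (pvComp v p₀) :=
        (List.perm_ext_iff_of_nodup hnd (pvComp_nodup v p₀)).2 hfin
      constructor
      · simp only [pvBfsLoop]
        apply pvVisAbs_congr v m _ _ habs
        intro p
        constructor
        · rintro (h | h)
          · exact Or.inl h
          · exact Or.inr ⟨(hS p h).1, (hS p h).2.1⟩
        · rintro (h | h)
          · exact Or.inl h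
          · exact Or.inr ((hfin p).2 ((mem_pvComp v p₀ p).2 h))
      · simp only [pvBfsLoop]
        rw [hcnt, hperm.length_eq]
    | c :: t =>
      have hcS : c ∈ S := hq c (by simp)
      have hcone : pvOne v c := (hS c hcS).1
      obtain ⟨T, h0, h1, h2, h3, h4, h5, h6⟩ :=
        pvBfsStep_foldl v W₀ c pvDeltas (fun d hd => hd) hcone t m cnt S habs hnd hcnt
      simp only [pvBfsLoop]
      have hTprops : ∀ s ∈ S ++ T, pvOne v s ∧ pvConn v p₀ s ∧ ¬ W₀ s := by
        intro s hs
        rcases List.mem_append.1 hs with hs | hs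
        · exact hS s hs
        · obtain ⟨hadj, hnw⟩ := h5 s hs
          exact ⟨hadj.2.1, Relation.ReflTransGen.tail (hS c hcS).2.1 hadj, hnw⟩
      have hSTlen : (S ++ T).length ≤ (pvComp v p₀).length :=
        pvS_length_le_comp v p₀ (S ++ T) h3 (fun s hs => ⟨(hTprops s hs).1, (hTprops s hs).2.1⟩)
      have := ih (t ++ T) (S ++ T)
        (List.foldl (pvBfsStep v (pvR v) (pvC v) c.1 c.2) (t, m, cnt) pvDeltas).2.1
        (cnt + (T.length : Int))
        h2 h3 hTprops
        (by  -- queue members are marked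
          intro a ha
          rcases List.mem_append.1 ha with ha | ha
          · exact List.mem_append_left _ (hq a (by simp [ha]))
          · exact List.mem_append_right _ ha)
        (by  -- closure
          intro a ha hanq b hab
          rcases List.mem_append.1 ha with haS | haT
          · by_cases hac : a = c
            · subst hac
              obtain ⟨d, hd, rfl⟩ := pvAdj_delta_cases v a b hab
              exact h6 d hd hab.2.1
            · have : a ∉ (c :: t) := by
                intro hmem
                rcases List.mem_cons.1 hmem with h | h
                · exact hac h
                · exact hanq (List.mem_append_left _ h)
              rcases hclosed a haS this b hab with hw | hs
              · exact Or.inl hw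
              · exact Or.inr (List.mem_append_left _ hs)
          · exact absurd (List.mem_append_right t haT) hanq)
        (by simp only [hcnt, List.length_append]; push_cast; ring)
        (by  -- fuel bound
          have hlen4 : T.length ≤ 4 := h4
          have hSle : S.length ≤ (pvComp v p₀).length := by
            have := hSTlen; simp at this; omega
          simp only [List.length_append] at hSTlen ⊢
          simp only [List.length_cons] at hfuel
          omega)
        (List.mem_append_left _ hp0)
      simp only [show [((-1 : Int), (0 : Int)), (1, 0), (0, -1), (0, 1)] = pvDeltas from rfl]
      rw [h0, h1]
      exact this

theorem pvRmCells_length (v : List (List Int)) :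
    (pvRmCells v).length = (pvR v).toNat * (pvC v).toNat := by
  simp [pvRmCells, List.length_flatMap, PySem.List.length_pyRange_one]

theorem pvComp_length_le (v : List (List Int)) (p : Int × Int) :
    (pvComp v p).length ≤ (pvR v).toNat * (pvC v).toNat := by
  rw [← pvRmCells_length v]
  exact ((List.filter_sublist (l := pvOnes v)).trans (List.filter_sublist (l := pvRmCells v))).length_le

theorem pvBfs_spec (v : List (List Int)) (W₀ : Int × Int → Prop) (m : List (List Bool))
    (p₀ : Int × Int)
    (hsat : ∀ a b, W₀ a → pvAdj v a b → W₀ b)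
    (habs : pvVisAbs v m W₀) (hW0 : ¬ W₀ p₀) (hone : pvOne v p₀) :
    pvVisAbs v (pvBfs v (pvR v) (pvC v) p₀.1 p₀.2 m).1
      (fun p => W₀ p ∨ (pvOne v p ∧ pvConn v p₀ p)) ∧
    (pvBfs v (pvR v) (pvC v) p₀.1 p₀.2 m).2 = ((pvComp v p₀).length : Int) := by
  unfold pvBfs
  have habs' : pvVisAbs v (pvVset m p₀.1 p₀.2) (fun p => W₀ p ∨ p ∈ [p₀]) := by
    apply pvVisAbs_congr v _ _ _ (pvVisAbs_vset v m W₀ p₀ habs hone.1)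
    intro p; simp
  have hcomp_pos : 1 ≤ (pvComp v p₀).length := by
    have : p₀ ∈ pvComp v p₀ := (mem_pvComp v p₀ p₀).2 ⟨hone, Relation.ReflTransGen.refl⟩
    exact List.length_pos_of_mem this
  have := pvBfsLoop_spec v W₀ p₀ hsat hW0
    ((pvR v).toNat * (pvC v).toNat * 5 + 5) [(p₀.1, p₀.2)] [p₀] (pvVset m p₀.1 p₀.2) 1
    habs'
    (by simp)
    (by intro s hs; simp at hs; subst hs; exact ⟨hone, Relation.ReflTransGen.refl, hW0⟩)
    (by intro c hc; simpa using hc)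
    (by intro a ha hnq; simp at ha; subst ha; simp at hnq)
    (by simp)
    (by
      have := pvComp_length_le v p₀
      simp only [List.length_cons, List.length_nil]
      omega)
    (by simp)
  simpa using this

-- ===== A's outer scan =====

theorem pvFoldl_flatMap {α β γ : Type} (l1 : List α) (l2 : α → List β) (f : γ → α → β → γ)
    (init : γ) :
    l1.foldl (fun s x => (l2 x).foldl (fun s' y => f s' x y) s) init
      = (l1.flatMap (fun x => (l2 x).map (fun y => (x, y)))).foldl (fun s p => f s p.1 p.2) init := by
  induction l1 generalizing init with
  | nil => rfl
  | cons x l1 ih =>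
    simp only [List.foldl_cons, List.flatMap_cons, List.foldl_append, List.foldl_map]
    exact ih _

def pvAStep (v : List (List Int)) (st : List Int × List (List Bool)) (p : Int × Int) :
    List Int × List (List Bool) :=
  if pvAt v p.1 p.2 = 1 ∧ pvVget st.2 p.1 p.2 = false then
    (st.1 ++ [(pvBfs v (pvR v) (pvC v) p.1 p.2 st.2).2],
     (pvBfs v (pvR v) (pvC v) p.1 p.2 st.2).1)
  else st

def pvWD (v : List (List Int)) (done : List (Int × Int)) (p : Int × Int) : Prop :=
  pvOne v p ∧ ∃ q ∈ done, pvOne v q ∧ pvConn v q p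

def pvOnesPred (v : List (List Int)) (p : Int × Int) : Bool := decide (pvAt v p.1 p.2 = 1)

noncomputable def pvFirstPred (v : List (List Int)) (p : Int × Int) : Bool :=
  @decide _ (Classical.propDecidable (pvIsFirst v p))

noncomputable def pvCanonOf (v : List (List Int)) (l : List (Int × Int)) : List Int :=
  (l.filter (pvFirstPred v)).map (fun p => ((pvComp v p).length : Int))

theorem pvCanon_eq_canonOf (v : List (List Int)) : pvCanon v = pvCanonOf v (pvOnes v) := rfl

theorem pvFirstPred_true {v : List (List Int)} {p : Int × Int} (h : pvIsFirst v p) :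
    pvFirstPred v p = true := by
  unfold pvFirstPred; exact @decide_eq_true _ (Classical.propDecidable _) h

theorem pvFirstPred_false {v : List (List Int)} {p : Int × Int} (h : ¬ pvIsFirst v p) :
    pvFirstPred v p = false := by
  unfold pvFirstPred; exact @decide_eq_false _ (Classical.propDecidable _) h

theorem pvWD_sat (v : List (List Int)) (done : List (Int × Int)) :
    ∀ a b, pvWD v done a → pvAdj v a b → pvWD v done b := by
  rintro a b ⟨ha, q, hq, hqone, hconn⟩ hadj
  exact ⟨hadj.2.1, q, hq, hqone, Relation.ReflTransGen.tail hconn hadj⟩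

theorem pvPrefix_facts (v : List (List Int)) (done rest : List (Int × Int)) (p : Int × Int)
    (h : pvRmCells v = done ++ p :: rest) :
    (∀ q ∈ done, pvRmLt q p) ∧ (∀ q ∈ rest, pvRmLt p q) := by
  have hpw := pvRmCells_pairwise v
  rw [h] at hpw
  rw [List.pairwise_append] at hpw
  obtain ⟨h1, h2, h3⟩ := hpw
  rw [List.pairwise_cons] at h2
  exact ⟨fun q hq => h3 q hq p (by simp), fun q hq => h2.1 q hq⟩

theorem pvRmLt_not_le {p q : Int × Int} (h : pvRmLt q p) : ¬ pvRmLe p q := by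
  unfold pvRmLt at h; unfold pvRmLe; omega

theorem pvNotRmLe_lt {p q : Int × Int} (h : ¬ pvRmLe p q) : pvRmLt q p := by
  unfold pvRmLe at h; unfold pvRmLt; omega

theorem pvA_outer (v : List (List Int)) :
    ∀ (rest done : List (Int × Int)) (m : List (List Bool)) (ws : List Int),
    pvRmCells v = done ++ rest →
    pvVisAbs v m (pvWD v done) →
    ws = pvCanonOf v (done.filter (pvOnesPred v)) →
    (rest.foldl (pvAStep v) (ws, m)).1 = pvCanonOf v ((done ++ rest).filter (pvOnesPred v)) := by
  intro rest
  induction rest with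
  | nil =>
    intro done m ws hsplit habs hws
    simpa using hws
  | cons p rest ih =>
    intro done m ws hsplit habs hws
    have hsplit' : pvRmCells v = (done ++ [p]) ++ rest := by rw [hsplit]; simp
    have hpmem : p ∈ pvRmCells v := by rw [hsplit]; simp
    have hpin : pvInGrid v p := (mem_pvRmCells v p).1 hpmem
    obtain ⟨hbefore, hafter⟩ := pvPrefix_facts v done rest p hsplit
    rw [List.foldl_cons]
    by_cases hone1 : pvAt v p.1 p.2 = 1
    · have hponE : pvOne v p := ⟨hpin, hone1⟩
      rcases Bool.eq_false_or_eq_true (pvVget m p.1 p.2) with hvis | hvis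
      · -- already visited: p's component was counted before
        have hWD : pvWD v done p := (habs.2 p hpin).1 hvis
        have hstep : pvAStep v (ws, m) p = (ws, m) := by
          simp only [pvAStep]
          rw [if_neg (by rw [hvis]; simp)]
        rw [hstep]
        have hnotfirst : ¬ pvIsFirst v p := by
          intro hf
          obtain ⟨_, q, hq, hqone, hconn⟩ := hWD
          exact pvRmLt_not_le (hbefore q hq) (hf q (pvConn_symm v hconn))
        apply Eq.trans (ih (done ++ [p]) m ws hsplit' ?habs2 ?hws2)
        · simp
        case habs2 =>
          apply pvVisAbs_congr v _ _ _ habs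
          intro r
          constructor
          · rintro ⟨hro, q, hq, hqone, hconn⟩
            exact ⟨hro, q, List.mem_append_left _ hq, hqone, hconn⟩
          · rintro ⟨hro, q, hq, hqone, hconn⟩
            rcases List.mem_append.1 hq with hq | hq
            · exact ⟨hro, q, hq, hqone, hconn⟩
            · rcases List.mem_cons.1 hq with rfl | hq
              · obtain ⟨_, q', hq', hq'one, hconn'⟩ := hWD
                exact ⟨hro, q', hq', hq'one, hconn'.trans hconn⟩
              · simp at hq
        case hws2 =>
          rw [hws]
          simp only [List.filter_append, pvCanonOf, List.map_append]
          have hp1 : List.filter (pvOnesPred v) [p] = [p] := by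
            simp [pvOnesPred, hone1]
          rw [hp1]
          have hp2 : List.filter (pvFirstPred v) [p] = [] := by
            simp only [List.filter_cons, List.filter_nil]
            rw [pvFirstPred_false hnotfirst]
            simp
          rw [hp2]
          simp
      · -- fresh component: run BFS
        have hW0 : ¬ pvWD v done p := by
          intro hw
          rw [(habs.2 p hpin).2 hw] at hvis
          exact absurd hvis (by simp)
        obtain ⟨habs', hcnt⟩ := pvBfs_spec v (pvWD v done) m p (pvWD_sat v done) habs hW0 hponE
        have hstep : pvAStep v (ws, m) p =
            (ws ++ [(pvBfs v (pvR v) (pvC v) p.1 p.2 m).2],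
             (pvBfs v (pvR v) (pvC v) p.1 p.2 m).1) := by
          simp only [pvAStep]
          rw [if_pos ⟨hone1, hvis⟩]
        rw [hstep]
        have hfirst : pvIsFirst v p := by
          intro q hconn
          by_contra hle
          have hlt := pvNotRmLe_lt hle
          have hqp : q ≠ p := by intro he; subst he; exact pvRmLt_irrefl _ hlt
          have hqone : pvOne v q := (pvConn_one_of_ne v hconn (fun he => hqp he.symm)).2
          have hqmem : q ∈ pvRmCells v := (mem_pvRmCells v q).2 hqone.1
          rw [hsplit] at hqmem
          rcases List.mem_append.1 hqmem with hq | hq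
          · exact hW0 ⟨hponE, q, hq, hqone, pvConn_symm v hconn⟩
          · rcases List.mem_cons.1 hq with rfl | hq
            · exact pvRmLt_irrefl _ hlt
            · exact pvRmLt_asymm (hafter q hq) hlt
        apply Eq.trans (ih (done ++ [p])
          (pvBfs v (pvR v) (pvC v) p.1 p.2 m).1
          (ws ++ [(pvBfs v (pvR v) (pvC v) p.1 p.2 m).2]) hsplit' ?habs ?hws)
        · simp
        case habs =>
          apply pvVisAbs_congr v _ _ _ habs'
          intro r
          constructor
          · rintro (hw | ⟨hro, hconn⟩)
            · exact ⟨hw.1, hw.2.choose, List.mem_append_left _ hw.2.choose_spec.1,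
                hw.2.choose_spec.2⟩
            · exact ⟨hro, p, List.mem_append_right _ (by simp), hponE, hconn⟩
          · rintro ⟨hro, q, hq, hqone, hconn⟩
            rcases List.mem_append.1 hq with hq | hq
            · exact Or.inl ⟨hro, q, hq, hqone, hconn⟩
            · rcases List.mem_cons.1 hq with rfl | hq
              · exact Or.inr ⟨hro, hconn⟩
              · simp at hq
        case hws =>
          rw [hcnt, hws]
          simp only [List.filter_append, pvCanonOf, List.map_append]
          congr 1
          have hp1 : List.filter (pvOnesPred v) [p] = [p] := by
            simp [pvOnesPred, hone1]
          rw [hp1]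
          have hp2 : List.filter (pvFirstPred v) [p] = [p] := by
            simp only [List.filter_cons, List.filter_nil]
            rw [pvFirstPred_true hfirst]
            simp
          rw [hp2]
          simp
    · -- not a 1-cell
      have hstep : pvAStep v (ws, m) p = (ws, m) := by
        simp only [pvAStep]
        rw [if_neg (by intro hc; exact hone1 hc.1)]
      rw [hstep]
      apply Eq.trans (ih (done ++ [p]) m ws hsplit' ?habs3 ?hws3)
      · simp
      case habs3 =>
        apply pvVisAbs_congr v _ _ _ habs
        intro r
        constructor
        · rintro ⟨hro, q, hq, hqone, hconn⟩
          exact ⟨hro, q, List.mem_append_left _ hq, hqone, hconn⟩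
        · rintro ⟨hro, q, hq, hqone, hconn⟩
          rcases List.mem_append.1 hq with hq | hq
          · exact ⟨hro, q, hq, hqone, hconn⟩
          · rcases List.mem_cons.1 hq with rfl | hq
            · exact absurd hqone.2 hone1
            · simp at hq
      case hws3 =>
        rw [hws]
        have hp1 : List.filter (pvOnesPred v) [p] = [] := by
          simp [pvOnesPred, hone1]
        rw [List.filter_append, hp1]
        simp

theorem pvWD_nil (v : List (List Int)) (p : Int × Int) : pvWD v [] p ↔ False := by
  unfold pvWD; simp

theorem pvA_characterization (v : List (List Int)) :
    find_white_spaces_width v =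
      [((pvCanon v).length : Int), (PySem.List.max? (pvCanon v) (fun z => z)).getD 0] := by
  unfold find_white_spaces_width
  have hfold :
      ((PySem.List.pyRange 0 (v.length : Int) 1).foldl (fun st x =>
        (PySem.List.pyRange 0 ((v.headD []).length : Int) 1).foldl
          (fun (st : List Int × List (List Bool)) y =>
            if pvAt v x y = 1 ∧ pvVget st.2 x y = false then
              ((st.1 ++ [(pvBfs v (v.length : Int) ((v.headD []).length : Int) x y st.2).2],
                (pvBfs v (v.length : Int) ((v.headD []).length : Int) x y st.2).1))
            else st) st)
        (([] : List Int),
          List.replicate ((v.length : Int)).toNat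
            (List.replicate (((v.headD []).length : Int)).toNat false))).1
      = pvCanonOf v ((([] : List (Int × Int)) ++ pvRmCells v).filter (pvOnesPred v)) := by
    rw [pvFoldl_flatMap (PySem.List.pyRange 0 (v.length : Int) 1)
      (fun _ => PySem.List.pyRange 0 ((v.headD []).length : Int) 1)
      (fun st x y =>
        if pvAt v x y = 1 ∧ pvVget st.2 x y = false then
          ((st.1 ++ [(pvBfs v (v.length : Int) ((v.headD []).length : Int) x y st.2).2],
            (pvBfs v (v.length : Int) ((v.headD []).length : Int) x y st.2).1))
        else st)]
    exact pvA_outer v (pvRmCells v) [] _ [] (by simp) (by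
      have := pvVisAbs_vis0 v
      apply pvVisAbs_congr v _ _ _ this
      intro p
      rw [pvWD_nil]) (by simp [pvCanonOf])
  simp only at hfold ⊢
  rw [hfold]
  simp only [pvCanon_eq_canonOf, pvOnes, pvRmCells, pvR, pvC, List.nil_append]
  rfl

-- ===== B: labeling / union-find correctness =====

theorem pvRtg_add_edge {α : Type} (r : α → α → Prop) (u w : α) (x y : α) :
    Relation.ReflTransGen (fun a b => r a b ∨ ((a = u ∧ b = w) ∨ (a = w ∧ b = u))) x y ↔
      (Relation.ReflTransGen r x y ∨
       (Relation.ReflTransGen r x u ∧ Relation.ReflTransGen r w y) ∨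
       (Relation.ReflTransGen r x w ∧ Relation.ReflTransGen r u y)) := by
  constructor
  · intro h
    induction h with
    | refl => exact Or.inl Relation.ReflTransGen.refl
    | tail hab hstep ih =>
      rename_i b c
      rcases hstep with hr | ⟨rfl, rfl⟩ | ⟨rfl, rfl⟩
      · rcases ih with h | ⟨h1, h2⟩ | ⟨h1, h2⟩
        · exact Or.inl (h.tail hr)
        · exact Or.inr (Or.inl ⟨h1, h2.tail hr⟩)
        · exact Or.inr (Or.inr ⟨h1, h2.tail hr⟩)
      · rcases ih with h | ⟨h1, h2⟩ | ⟨h1, h2⟩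
        · exact Or.inr (Or.inl ⟨h, Relation.ReflTransGen.refl⟩)
        · exact Or.inr (Or.inl ⟨h1, Relation.ReflTransGen.refl⟩)
        · exact Or.inl h1
      · rcases ih with h | ⟨h1, h2⟩ | ⟨h1, h2⟩
        · exact Or.inr (Or.inr ⟨h, Relation.ReflTransGen.refl⟩)
        · exact Or.inl h1
        · exact Or.inr (Or.inr ⟨h1, Relation.ReflTransGen.refl⟩)
  · have hmono : ∀ a b, Relation.ReflTransGen r a b →
        Relation.ReflTransGen (fun a b => r a b ∨ ((a = u ∧ b = w) ∨ (a = w ∧ b = u))) a b :=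
      fun a b h => Relation.ReflTransGen.mono (fun _ _ hr => Or.inl hr) h
    have hedge : Relation.ReflTransGen
        (fun a b => r a b ∨ ((a = u ∧ b = w) ∨ (a = w ∧ b = u))) u w :=
      Relation.ReflTransGen.single (Or.inr (Or.inl ⟨rfl, rfl⟩))
    have hedge' : Relation.ReflTransGen
        (fun a b => r a b ∨ ((a = u ∧ b = w) ∨ (a = w ∧ b = u))) w u :=
      Relation.ReflTransGen.single (Or.inr (Or.inr ⟨rfl, rfl⟩))
    rintro (h | ⟨h1, h2⟩ | ⟨h1, h2⟩)
    · exact hmono _ _ h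
    · exact ((hmono _ _ h1).trans hedge).trans (hmono _ _ h2)
    · exact ((hmono _ _ h1).trans hedge').trans (hmono _ _ h2)

theorem pvRelabel_keys (r : PySem.Dict (Int × Int) (Int × Int)) (a b : Int × Int) :
    (pvRelabel r a b).keys = r.keys := by
  cases r with
  | mk items =>
    simp [pvRelabel, PySem.Dict.keys]

theorem pvRelabel_items (r : PySem.Dict (Int × Int) (Int × Int)) (a b : Int × Int) :
    (pvRelabel r a b).items = r.items.map (fun kv => (kv.1, if kv.2 = a then b else kv.2)) := by
  cases r with
  | mk items => rfl

theorem pvRelabel_get? (r : PySem.Dict (Int × Int) (Int × Int)) (a b k : Int × Int) :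
    (pvRelabel r a b).get? k = (r.get? k).map (fun w => if w = a then b else w) := by
  cases r with
  | mk l =>
    induction l with
    | nil => rfl
    | cons kv l ih =>
      have : pvRelabel (PySem.Dict.mk (kv :: l)) a b =
          PySem.Dict.mk ((kv.1, if kv.2 = a then b else kv.2) ::
            l.map (fun kv => (kv.1, if kv.2 = a then b else kv.2))) := rfl
      rw [this, PySem.Dict.get?_mk_cons, PySem.Dict.get?_mk_cons]
      by_cases hk : kv.1 == k
      · simp [hk]
      · simp only [hk]
        simpa [pvRelabel] using ih

def pvF (rep : PySem.Dict (Int × Int) (Int × Int)) (k : Int × Int) : Int × Int :=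
  (rep.get? k).getD k

def pvLab (rep : PySem.Dict (Int × Int) (Int × Int)) (K : List (Int × Int))
    (g : Int × Int → Int × Int → Prop) : Prop :=
  rep.keys = K ∧ (∀ kv ∈ rep.items, kv.2 ∈ K) ∧
    ∀ a ∈ K, ∀ b ∈ K, (pvF rep a = pvF rep b ↔ Relation.ReflTransGen g a b)

theorem pvF_get?_isSome (rep : PySem.Dict (Int × Int) (Int × Int)) (k : Int × Int)
    (hk : k ∈ rep.keys) : rep.get? k = some (pvF rep k) := by
  have hc : rep.contains k = true := (PySem.Dict.contains_iff_mem_keys rep k).2 hk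
  rw [PySem.Dict.contains_eq_isSome_get?] at hc
  obtain ⟨w, hw⟩ := Option.isSome_iff_exists.1 hc
  rw [hw]; simp [pvF, hw]

theorem pvF_mem (rep : PySem.Dict (Int × Int) (Int × Int)) (K : List (Int × Int))
    (g : Int × Int → Int × Int → Prop) (hlab : pvLab rep K g) (k : Int × Int) (hk : k ∈ K) :
    pvF rep k ∈ K := by
  obtain ⟨hkeys, hvals, _⟩ := hlab
  have hsome := pvF_get?_isSome rep k (by rw [hkeys]; exact hk)
  exact hvals _ (PySem.Dict.mem_items_of_get?_eq_some rep hsome)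

theorem pvLab_insert (rep : PySem.Dict (Int × Int) (Int × Int)) (K : List (Int × Int))
    (g : Int × Int → Int × Int → Prop) (p : Int × Int)
    (hlab : pvLab rep K g) (hp : p ∉ K) (hg : ∀ a b, g a b → a ∈ K ∧ b ∈ K) :
    pvLab (rep.insert p p) (K ++ [p]) g := by
  obtain ⟨hkeys, hvals, hclass⟩ := hlab
  have hnc : rep.contains p = false := by
    rw [← Bool.not_eq_true, PySem.Dict.contains_iff_mem_keys, hkeys]
    exact hp
  have hFp : pvF (rep.insert p p) p = p := by
    simp [pvF, PySem.Dict.get?_insert_self]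
  have hFa : ∀ a ∈ K, pvF (rep.insert p p) a = pvF rep a := by
    intro a ha
    have : a ≠ p := fun h => hp (h ▸ ha)
    simp [pvF, PySem.Dict.get?_insert_of_ne rep p this]
  have hrtgp : ∀ b, Relation.ReflTransGen g p b → b = p := by
    intro b h
    rcases Relation.ReflTransGen.cases_head h with h | ⟨c, hc, _⟩
    · exact h.symm
    · exact absurd (hg p c hc).1 hp
  have hrtgp' : ∀ a, Relation.ReflTransGen g a p → a = p := by
    intro a h
    rcases (Relation.ReflTransGen.cases_tail h) with h | ⟨c, _, hc⟩
    · exact h.symm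
    · exact absurd (hg c p hc).2 hp
  refine ⟨by rw [PySem.Dict.keys_insert_of_not_contains rep p hnc, hkeys], ?_, ?_⟩
  · intro kv hkv
    rcases (PySem.Dict.mem_items_insert rep p p kv).1 hkv with rfl | ⟨hkv', _⟩
    · simp
    · exact List.mem_append_left _ (hvals kv hkv')
  · intro a ha b hb
    rcases List.mem_append.1 ha with haK | haP
    · rcases List.mem_append.1 hb with hbK | hbP
      · rw [hFa a haK, hFa b hbK]; exact hclass a haK b hbK
      · have hbp : b = p := by simpa using hbP
        subst hbp
        rw [hFa a haK, hFp]
        constructor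
        · intro h
          exact absurd (h ▸ pvF_mem rep K g ⟨hkeys, hvals, hclass⟩ a haK) hp
        · intro h
          exact absurd ((hrtgp' a h) ▸ haK) hp
    · have hap : a = p := by simpa using haP
      subst hap
      rcases List.mem_append.1 hb with hbK | hbP
      · rw [hFa b hbK, hFp]
        constructor
        · intro h
          have hm := pvF_mem rep K g ⟨hkeys, hvals, hclass⟩ b hbK
          rw [← h] at hm
          exact absurd hm hp
        · intro h
          exact absurd ((hrtgp b h) ▸ hbK) hp
      · have hbp : b = a := by simpa using hbP
        subst hbp
        exact ⟨fun _ => Relation.ReflTransGen.refl, fun _ => rfl⟩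

theorem pvMergeEq {α : Type} [DecidableEq α] (A B e₁ e₂ : α) (h : A ≠ B) :
    ((if e₁ = A then B else e₁) = (if e₂ = A then B else e₂)) ↔
      (e₁ = e₂ ∨ (e₁ = A ∧ e₂ = B) ∨ (e₁ = B ∧ e₂ = A)) := by
  split_ifs with h1 h2 h2
  · exact ⟨fun _ => Or.inl (h1.trans h2.symm), fun _ => rfl⟩
  · constructor
    · intro hx; exact Or.inr (Or.inl ⟨h1, hx.symm⟩)
    · rintro (he | ⟨_, he2⟩ | ⟨_, he2⟩)
      · exact absurd (he ▸ h1) h2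
      · exact he2.symm
      · exact absurd he2 h2
  · constructor
    · intro hx; exact Or.inr (Or.inr ⟨hx, h2⟩)
    · rintro (he | ⟨he1, _⟩ | ⟨he1, _⟩)
      · exact absurd (he.trans h2) h1
      · exact absurd he1 h1
      · exact he1
  · constructor
    · intro hx; exact Or.inl hx
    · rintro (he | ⟨he1, _⟩ | ⟨_, he2⟩)
      · exact he
      · exact absurd he1 h1
      · exact absurd he2 h2

theorem pvF_relabel (rep : PySem.Dict (Int × Int) (Int × Int)) (A B k : Int × Int)
    (hk : k ∈ rep.keys) :
    pvF (pvRelabel rep A B) k = if pvF rep k = A then B else pvF rep k := by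
  have hsome := pvF_get?_isSome rep k hk
  conv_lhs => rw [pvF]
  rw [pvRelabel_get?, hsome]
  simp

theorem pvLab_merge (rep : PySem.Dict (Int × Int) (Int × Int)) (K : List (Int × Int))
    (g : Int × Int → Int × Int → Prop) (u w : Int × Int)
    (hlab : pvLab rep K g) (hu : u ∈ K) (hw : w ∈ K) (hsym : Symmetric g) :
    pvLab (if pvF rep u ≠ pvF rep w then pvRelabel rep (pvF rep u) (pvF rep w) else rep) K
      (fun a b => g a b ∨ ((a = u ∧ b = w) ∨ (a = w ∧ b = u))) := by
  obtain ⟨hkeys, hvals, hclass⟩ := hlab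
  have hsRTG : Symmetric (Relation.ReflTransGen g) := Relation.ReflTransGen.symmetric hsym
  by_cases hne : pvF rep u ≠ pvF rep w
  · rw [if_pos hne]
    set A := pvF rep u with hA
    set B := pvF rep w with hB
    have hBK : B ∈ K := pvF_mem rep K g ⟨hkeys, hvals, hclass⟩ w hw
    refine ⟨by rw [pvRelabel_keys, hkeys], ?_, ?_⟩
    · intro kv hkv
      rw [pvRelabel_items] at hkv
      obtain ⟨kv', hkv', rfl⟩ := List.mem_map.1 hkv
      by_cases hva : kv'.2 = A
      · simp only [hva, if_pos rfl]
        exact hBK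
      · simp only [if_neg hva]
        exact hvals kv' hkv'
    · intro a ha b hb
      rw [pvF_relabel rep A B a (by rw [hkeys]; exact ha),
          pvF_relabel rep A B b (by rw [hkeys]; exact hb)]
      rw [pvMergeEq A B (pvF rep a) (pvF rep b) hne]
      rw [pvRtg_add_edge g u w a b]
      constructor
      · rintro (h | ⟨h1, h2⟩ | ⟨h1, h2⟩)
        · exact Or.inl ((hclass a ha b hb).1 h)
        · exact Or.inr (Or.inl ⟨(hclass a ha u hu).1 h1,
            hsRTG ((hclass b hb w hw).1 h2)⟩)
        · exact Or.inr (Or.inr ⟨(hclass a ha w hw).1 h1,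
            hsRTG ((hclass b hb u hu).1 h2)⟩)
      · rintro (h | ⟨h1, h2⟩ | ⟨h1, h2⟩)
        · exact Or.inl ((hclass a ha b hb).2 h)
        · exact Or.inr (Or.inl ⟨(hclass a ha u hu).2 h1, (hclass b hb w hw).2 (hsRTG h2)⟩)
        · exact Or.inr (Or.inr ⟨(hclass a ha w hw).2 h1, (hclass b hb u hu).2 (hsRTG h2)⟩)
  · rw [if_neg hne]
    push_neg at hne
    have huw : Relation.ReflTransGen g u w := (hclass u hu w hw).1 hne
    refine ⟨hkeys, hvals, ?_⟩
    intro a ha b hb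
    rw [hclass a ha b hb, pvRtg_add_edge g u w a b]
    constructor
    · intro h; exact Or.inl h
    · rintro (h | ⟨h1, h2⟩ | ⟨h1, h2⟩)
      · exact h
      · exact (h1.trans huw).trans h2
      · exact (h1.trans (hsRTG huw)).trans h2

theorem pvLab_congr (rep : PySem.Dict (Int × Int) (Int × Int)) (K : List (Int × Int))
    (g g' : Int × Int → Int × Int → Prop) (hlab : pvLab rep K g)
    (h : ∀ a b, g a b ↔ g' a b) : pvLab rep K g' := by
  obtain ⟨hkeys, hvals, hclass⟩ := hlab
  refine ⟨hkeys, hvals, ?_⟩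
  intro a ha b hb
  rw [hclass a ha b hb]
  constructor
  · exact fun hh => Relation.ReflTransGen.mono (fun x y hxy => (h x y).1 hxy) hh
  · exact fun hh => Relation.ReflTransGen.mono (fun x y hxy => (h x y).2 hxy) hh

def pvAdjOn (v : List (List Int)) (W : List (Int × Int)) (a b : Int × Int) : Prop :=
  pvAdj v a b ∧ a ∈ W ∧ b ∈ W

theorem pvAdjOn_symm (v : List (List Int)) (W : List (Int × Int)) :
    Symmetric (pvAdjOn v W) := by
  rintro a b ⟨hadj, ha, hb⟩
  exact ⟨pvAdj_symm v hadj, hb, ha⟩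

def pvBStep (v : List (List Int)) (rep : PySem.Dict (Int × Int) (Int × Int))
    (p : Int × Int) : PySem.Dict (Int × Int) (Int × Int) :=
  if pvAt v p.1 p.2 = 1 then
    [(p.1 - 1, p.2), (p.1, p.2 - 1)].foldl (fun rep2 n =>
      if 0 ≤ n.1 ∧ 0 ≤ n.2 ∧ pvAt v n.1 n.2 = 1 then
        (if (rep2.get? (p.1, p.2)).getD (p.1, p.2) ≠ (rep2.get? n).getD n then
          pvRelabel rep2 ((rep2.get? (p.1, p.2)).getD (p.1, p.2)) ((rep2.get? n).getD n)
        else rep2)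
      else rep2) (rep.insert (p.1, p.2) (p.1, p.2))
  else rep

theorem pvB_neighbor (v : List (List Int)) (rep2 : PySem.Dict (Int × Int) (Int × Int))
    (K : List (Int × Int)) (p n : Int × Int) (g : Int × Int → Int × Int → Prop)
    (hlab2 : pvLab rep2 K g) (hsym : Symmetric g) (hpK : p ∈ K)
    (hnK : (0 ≤ n.1 ∧ 0 ≤ n.2 ∧ pvAt v n.1 n.2 = 1) → n ∈ K) :
    pvLab (if 0 ≤ n.1 ∧ 0 ≤ n.2 ∧ pvAt v n.1 n.2 = 1 then
        (if pvF rep2 p ≠ pvF rep2 n then pvRelabel rep2 (pvF rep2 p) (pvF rep2 n) else rep2)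
      else rep2) K
      (fun a b => g a b ∨
        ((0 ≤ n.1 ∧ 0 ≤ n.2 ∧ pvAt v n.1 n.2 = 1) ∧ ((a = p ∧ b = n) ∨ (a = n ∧ b = p)))) := by
  by_cases hcond : (0 ≤ n.1 ∧ 0 ≤ n.2 ∧ pvAt v n.1 n.2 = 1)
  · rw [if_pos hcond]
    apply pvLab_congr _ _ _ _ (pvLab_merge rep2 K g p n hlab2 hpK (hnK hcond) hsym)
    intro a b
    constructor
    · rintro (h | h)
      · exact Or.inl h
      · exact Or.inr ⟨hcond, h⟩
    · rintro (h | ⟨_, h⟩)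
      · exact Or.inl h
      · exact Or.inr h
  · rw [if_neg hcond]
    apply pvLab_congr _ _ _ _ hlab2
    intro a b
    constructor
    · exact fun h => Or.inl h
    · rintro (h | ⟨hc, _⟩)
      · exact h
      · exact absurd hc hcond

theorem pvB_cell (v : List (List Int)) (done rest : List (Int × Int)) (p : Int × Int)
    (rep : PySem.Dict (Int × Int) (Int × Int))
    (hsplit : pvRmCells v = done ++ p :: rest)
    (hlab : pvLab rep (done.filter (pvOnesPred v))
      (pvAdjOn v (done.filter (pvOnesPred v)))) :
    pvLab (pvBStep v rep p) ((done ++ [p]).filter (pvOnesPred v))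
      (pvAdjOn v ((done ++ [p]).filter (pvOnesPred v))) := by
  have hpmem : p ∈ pvRmCells v := by rw [hsplit]; simp
  have hpin : pvInGrid v p := (mem_pvRmCells v p).1 hpmem
  obtain ⟨hbefore, hafter⟩ := pvPrefix_facts v done rest p hsplit
  by_cases honeAt : pvAt v p.1 p.2 = 1
  · have hponE : pvOne v p := ⟨hpin, honeAt⟩
    set W := done.filter (pvOnesPred v) with hW
    have hW' : (done ++ [p]).filter (pvOnesPred v) = W ++ [p] := by
      rw [List.filter_append]
      congr 1
      simp [pvOnesPred, honeAt]
    rw [hW']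
    have hpdone : p ∉ done := by
      have hnd := pvRmCells_nodup v
      rw [hsplit] at hnd
      have := List.disjoint_of_nodup_append hnd
      intro hc
      exact this hc (by simp)
    have hpW : p ∉ W := fun hc => hpdone (List.mem_of_mem_filter hc)
    have hWdone : ∀ a ∈ W, a ∈ done ∧ pvOne v a := by
      intro a ha
      refine ⟨List.mem_of_mem_filter ha, ?_⟩
      have h1 := List.of_mem_filter ha
      have h2 : a ∈ pvRmCells v := by rw [hsplit]; exact List.mem_append_left _ (List.mem_of_mem_filter ha)
      exact ⟨(mem_pvRmCells v a).1 h2, by simpa [pvOnesPred] using h1⟩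
    have hmemW : ∀ q : Int × Int, pvOne v q → pvRmLt q p → q ∈ W := by
      intro q hone hlt
      have hq : q ∈ pvRmCells v := (mem_pvRmCells v q).2 hone.1
      rw [hsplit] at hq
      rcases List.mem_append.1 hq with hq | hq
      · exact List.mem_filter.2 ⟨hq, by simp [pvOnesPred, hone.2]⟩
      · rcases List.mem_cons.1 hq with rfl | hq
        · exact absurd hlt (pvRmLt_irrefl q)
        · exact absurd hlt (pvRmLt_asymm (hafter q hq))
    -- the two candidate neighbours
    have hn1 : ∀ n : Int × Int, (n = (p.1 - 1, p.2) ∨ n = (p.1, p.2 - 1)) →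
        (0 ≤ n.1 ∧ 0 ≤ n.2 ∧ pvAt v n.1 n.2 = 1) → n ∈ W := by
      rintro n (rfl | rfl) hc
      · refine hmemW _ ⟨⟨hc.1, ?_, hc.2.1, ?_⟩, hc.2.2⟩ (by unfold pvRmLt; simp)
        · simp; have := hpin.2.1; omega
        · simpa using hpin.2.2.2
      · refine hmemW _ ⟨⟨hc.1, ?_, hc.2.1, ?_⟩, hc.2.2⟩ (by unfold pvRmLt; simp)
        · simpa using hpin.2.1
        · simp; have := hpin.2.2.2; omega
    have hg0 : ∀ a b, pvAdjOn v W a b → a ∈ W ∧ b ∈ W := fun a b h => ⟨h.2.1, h.2.2⟩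
    have hlab1 : pvLab (rep.insert p p) (W ++ [p]) (pvAdjOn v W) :=
      pvLab_insert rep W (pvAdjOn v W) p hlab hpW hg0
    have hpK : p ∈ W ++ [p] := List.mem_append_right _ (by simp)
    -- apply the two neighbour steps
    simp only [pvBStep, if_pos honeAt, List.foldl_cons, List.foldl_nil]
    have h1 := pvB_neighbor v (rep.insert p p) (W ++ [p]) p (p.1 - 1, p.2) (pvAdjOn v W)
      hlab1 (pvAdjOn_symm v W) hpK
      (fun hc => List.mem_append_left _ (hn1 _ (Or.inl rfl) hc))
    have hsym1 : Symmetric (fun a b => pvAdjOn v W a b ∨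
        ((0 ≤ p.1 - 1 ∧ 0 ≤ p.2 ∧ pvAt v (p.1 - 1) p.2 = 1) ∧
          ((a = p ∧ b = (p.1 - 1, p.2)) ∨ (a = (p.1 - 1, p.2) ∧ b = p)))) := by
      rintro a b (h | ⟨hc, h⟩)
      · exact Or.inl (pvAdjOn_symm v W h)
      · exact Or.inr ⟨hc, h.symm.imp (fun h => ⟨h.2, h.1⟩) (fun h => ⟨h.2, h.1⟩)⟩
    have h2 := pvB_neighbor v _ (W ++ [p]) p (p.1, p.2 - 1) _ h1 hsym1 hpK
      (fun hc => List.mem_append_left _ (hn1 _ (Or.inr rfl) hc))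
    apply pvLab_congr _ _ _ _ h2
    -- the two conditional edges are exactly the adjacencies inside W ++ [p]
    intro a b
    constructor
    · rintro ((h | ⟨hc, h⟩) | ⟨hc, h⟩)
      · exact ⟨h.1, List.mem_append_left _ h.2.1, List.mem_append_left _ h.2.2⟩
      · have hone : pvOne v (p.1 - 1, p.2) := by
          refine ⟨⟨hc.1, ?_, hc.2.1, ?_⟩, hc.2.2⟩
          · simp; have := hpin.2.1; omega
          · simpa using hpin.2.2.2
        have hadj : pvAdj v p (p.1 - 1, p.2) := ⟨hponE, hone, by simp⟩
        have hmem : (p.1 - 1, p.2) ∈ W ++ [p] :=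
          List.mem_append_left _ (hn1 _ (Or.inl rfl) hc)
        rcases h with ⟨rfl, rfl⟩ | ⟨rfl, rfl⟩
        · exact ⟨hadj, hpK, hmem⟩
        · exact ⟨pvAdj_symm v hadj, hmem, hpK⟩
      · have hone : pvOne v (p.1, p.2 - 1) := by
          refine ⟨⟨hc.1, ?_, hc.2.1, ?_⟩, hc.2.2⟩
          · simpa using hpin.2.1
          · simp; have := hpin.2.2.2; omega
        have hadj : pvAdj v p (p.1, p.2 - 1) := ⟨hponE, hone, by simp⟩
        have hmem : (p.1, p.2 - 1) ∈ W ++ [p] :=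
          List.mem_append_left _ (hn1 _ (Or.inr rfl) hc)
        rcases h with ⟨rfl, rfl⟩ | ⟨rfl, rfl⟩
        · exact ⟨hadj, hpK, hmem⟩
        · exact ⟨pvAdj_symm v hadj, hmem, hpK⟩
    · rintro ⟨hadj, ha, hb⟩
      have hcases : ∀ c : Int × Int, pvAdj v p c → c ∈ W →
          ((0 ≤ p.1 - 1 ∧ 0 ≤ p.2 ∧ pvAt v (p.1 - 1) p.2 = 1) ∧ c = (p.1 - 1, p.2)) ∨
          ((0 ≤ p.1 ∧ 0 ≤ p.2 - 1 ∧ pvAt v p.1 (p.2 - 1) = 1) ∧ c = (p.1, p.2 - 1)) := by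
        intro c hadjc hcW
        have hclt : pvRmLt c p := hbefore c (hWdone c hcW).1
        have hcone : pvOne v c := hadjc.2.1
        obtain ⟨_, _, hd⟩ := hadjc
        rcases hd with h | h | h | h
        · left
          refine ⟨⟨?_, ?_, ?_⟩, Prod.ext (by omega) (by omega)⟩
          · have := hcone.1.1; omega
          · have := hcone.1.2.2.1; omega
          · have heq : c = (p.1 - 1, p.2) := Prod.ext (by omega) (by omega)
            rw [heq] at hcone; exact hcone.2
        · exfalso
          unfold pvRmLt at hclt; omega
        · right
          refine ⟨⟨?_, ?_, ?_⟩, Prod.ext (by omega) (by omega)⟩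
          · have := hcone.1.1; omega
          · have := hcone.1.2.2.1; omega
          · have heq : c = (p.1, p.2 - 1) := Prod.ext (by omega) (by omega)
            rw [heq] at hcone; exact hcone.2
        · exfalso
          unfold pvRmLt at hclt; omega
      rcases List.mem_append.1 ha with haW | haP
      · rcases List.mem_append.1 hb with hbW | hbP
        · exact Or.inl (Or.inl ⟨hadj, haW, hbW⟩)
        · -- b = p, a ∈ W
          have hbp : b = p := by simpa using hbP
          subst hbp
          rcases hcases a (pvAdj_symm v hadj) haW with ⟨hc, rfl⟩ | ⟨hc, rfl⟩
          · exact Or.inl (Or.inr ⟨hc, Or.inr ⟨rfl, rfl⟩⟩)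
          · exact Or.inr ⟨hc, Or.inr ⟨rfl, rfl⟩⟩
      · have hap : a = p := by simpa using haP
        subst hap
        rcases List.mem_append.1 hb with hbW | hbP
        · rcases hcases b hadj hbW with ⟨hc, rfl⟩ | ⟨hc, rfl⟩
          · exact Or.inl (Or.inr ⟨hc, Or.inl ⟨rfl, rfl⟩⟩)
          · exact Or.inr ⟨hc, Or.inl ⟨rfl, rfl⟩⟩
        · have hbp : b = a := by simpa using hbP
          subst hbp
          exact absurd rfl (pvAdj_ne v hadj)
  · -- not a 1-cell: nothing happens
    have hW' : (done ++ [p]).filter (pvOnesPred v) = done.filter (pvOnesPred v) := by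
      rw [List.filter_append]
      have : List.filter (pvOnesPred v) [p] = [] := by simp [pvOnesPred, honeAt]
      rw [this, List.append_nil]
    rw [hW']
    simpa only [pvBStep, if_neg honeAt] using hlab

theorem pvB_outer (v : List (List Int)) :
    ∀ (rest done : List (Int × Int)) (rep : PySem.Dict (Int × Int) (Int × Int)),
    pvRmCells v = done ++ rest →
    pvLab rep (done.filter (pvOnesPred v)) (pvAdjOn v (done.filter (pvOnesPred v))) →
    pvLab (rest.foldl (pvBStep v) rep) ((done ++ rest).filter (pvOnesPred v))
      (pvAdjOn v ((done ++ rest).filter (pvOnesPred v))) := by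
  intro rest
  induction rest with
  | nil =>
    intro done rep hsplit hlab
    simpa using hlab
  | cons p rest ih =>
    intro done rep hsplit hlab
    rw [List.foldl_cons]
    have hsplit' : pvRmCells v = (done ++ [p]) ++ rest := by rw [hsplit]; simp
    have := ih (done ++ [p]) (pvBStep v rep p) hsplit'
      (pvB_cell v done rest p rep hsplit hlab)
    have hassoc : (done ++ [p]) ++ rest = done ++ p :: rest := by simp
    rw [hassoc] at this
    exact this

-- ===== B: assembling the counts =====

theorem pvOnes_eq_filterPred (v : List (List Int)) :
    pvOnes v = (pvRmCells v).filter (pvOnesPred v) := rfl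

theorem pvOfList_first (v : List (List Int)) (F : Int × Int → Int × Int)
    (hclass : ∀ a ∈ pvOnes v, ∀ b ∈ pvOnes v, (F a = F b ↔ pvConn v a b)) :
    ∀ (l rest : List (Int × Int)), pvOnes v = l ++ rest →
    PySem.Set.ofList (l.map F) = (l.filter (pvFirstPred v)).map F := by
  intro l
  induction l using List.reverseRecOn with
  | nil => intro rest h; simp [PySem.Set.ofList]
  | append_singleton l a ih =>
    intro rest hsplit
    have hsplit' : pvOnes v = l ++ ([a] ++ rest) := by rw [hsplit]; simp
    have hih := ih ([a] ++ rest) hsplit'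
    have hones_pw := pvOnes_pairwise v
    rw [hsplit'] at hones_pw
    have hpw := List.pairwise_append.1 hones_pw
    have hlta : ∀ q ∈ l, pvRmLt q a := fun q hq => hpw.2.2 q hq a (by simp)
    have haone : pvOne v a := (mem_pvOnes v a).1 (by rw [hsplit]; simp)
    have hlones : ∀ q ∈ l, pvOne v q :=
      fun q hq => (mem_pvOnes v q).1 (by rw [hsplit']; exact List.mem_append_left _ hq)
    have hamem : a ∈ pvOnes v := by rw [hsplit]; simp
    rw [List.map_append, List.filter_append]
    rw [PySem.Set.ofList_eq_foldl, List.foldl_append, ← PySem.Set.ofList_eq_foldl]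
    simp only [List.map_cons, List.map_nil, List.foldl_cons, List.foldl_nil]
    by_cases hmem : F a ∈ l.map F
    · -- a is connected to an earlier cell: not a first
      obtain ⟨q, hq, hFq⟩ := List.mem_map.1 hmem
      have hqmem : q ∈ pvOnes v := by rw [hsplit']; exact List.mem_append_left _ hq
      have hconn : pvConn v a q := (hclass a hamem q hqmem).1 hFq.symm
      have hnotfirst : ¬ pvIsFirst v a :=
        fun hf => pvRmLt_not_le (hlta q hq) (hf q hconn)
      rw [PySem.Set.add_eq_ite]
      rw [if_pos (by rw [PySem.Set.mem_ofList]; exact hmem)]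
      have : List.filter (pvFirstPred v) [a] = [] := by
        simp [List.filter_cons, pvFirstPred_false hnotfirst]
      rw [this, hih]
      simp
    · -- no earlier cell of a's component: a is its first cell
      have hfirst : pvIsFirst v a := by
        intro q hconn
        by_contra hle
        have hlt := pvNotRmLe_lt hle
        have hqa : q ≠ a := by intro he; subst he; exact pvRmLt_irrefl _ hlt
        have hqone : pvOne v q := (pvConn_one_of_ne v hconn (fun he => hqa he.symm)).2
        have hqmem : q ∈ pvOnes v := (mem_pvOnes v q).2 hqone
        have hql : q ∈ l := by
          rw [hsplit'] at hqmem
          rcases List.mem_append.1 hqmem with hq | hq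
          · exact hq
          · rcases List.mem_cons.1 hq with rfl | hq
            · exact absurd hlt (pvRmLt_irrefl q)
            · have hpw' := hpw.2.1
              rw [List.singleton_append, List.pairwise_cons] at hpw'
              exact absurd hlt (pvRmLt_asymm (hpw'.1 q hq))
        have : F q = F a := (hclass q hqmem a hamem).2 (pvConn_symm v hconn)
        exact hmem (List.mem_map.2 ⟨q, hql, this⟩)
      rw [PySem.Set.add_eq_ite]
      rw [if_neg (by rw [PySem.Set.mem_ofList]; exact hmem)]
      have : List.filter (pvFirstPred v) [a] = [a] := by
        simp [List.filter_cons, pvFirstPred_true hfirst]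
      rw [this, hih]
      simp

theorem pvCount_comp (v : List (List Int)) (F : Int × Int → Int × Int)
    (hclass : ∀ a ∈ pvOnes v, ∀ b ∈ pvOnes v, (F a = F b ↔ pvConn v a b))
    (p : Int × Int) (hp : p ∈ pvOnes v) :
    ((pvOnes v).map F).count (F p) = (pvComp v p).length := by
  have h1 : ((pvOnes v).map F).count (F p) = (pvOnes v).countP (fun q => F q == F p) := by
    simp [List.count, List.countP_map]; rfl
  rw [h1, List.countP_eq_length_filter]
  unfold pvComp
  congr 1
  apply List.filter_congr
  intro q hq
  by_cases hc : pvConn v p q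
  · have hFq : F q = F p := (hclass q hq p hp).2 (pvConn_symm v hc)
    rw [@decide_eq_true _ (Classical.propDecidable _) hc]
    simp [hFq]
  · have hne : F q ≠ F p := by
      intro he
      exact hc (pvConn_symm v ((hclass q hq p hp).1 he))
    rw [@decide_eq_false _ (Classical.propDecidable _) hc]
    simp [hne]

-- ===== B: characterization of the alt port =====

theorem pvLab_empty (v : List (List Int)) :
    pvLab (PySem.Dict.mk []) (([] : List (Int × Int)).filter (pvOnesPred v))
      (pvAdjOn v (([] : List (Int × Int)).filter (pvOnesPred v))) := by
  refine ⟨rfl, ?_, ?_⟩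
  · intro kv hkv
    simp [PySem.Dict.items] at hkv
  · intro a ha
    simp at ha

theorem pvB_rep_lab (v : List (List Int)) :
    pvLab ((pvRmCells v).foldl (pvBStep v) (PySem.Dict.mk [])) (pvOnes v)
      (pvAdjOn v (pvOnes v)) := by
  have h := pvB_outer v (pvRmCells v) [] (PySem.Dict.mk []) (by simp) (pvLab_empty v)
  simpa only [List.nil_append, ← pvOnes_eq_filterPred] using h

theorem pvB_rep_class (v : List (List Int)) :
    ∀ a ∈ pvOnes v, ∀ b ∈ pvOnes v,
      (pvF ((pvRmCells v).foldl (pvBStep v) (PySem.Dict.mk [])) a =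
       pvF ((pvRmCells v).foldl (pvBStep v) (PySem.Dict.mk [])) b ↔ pvConn v a b) := by
  have hlab := pvB_rep_lab v
  intro a ha b hb
  rw [hlab.2.2 a ha b hb]
  unfold pvConn
  constructor
  · exact fun h => Relation.ReflTransGen.mono (fun x y hxy => hxy.1) h
  · refine fun h => Relation.ReflTransGen.mono ?_ h
    intro x y hxy
    exact ⟨hxy, (mem_pvOnes v x).2 hxy.1, (mem_pvOnes v y).2 hxy.2.1⟩

theorem pvB_characterization (v : List (List Int)) :
    find_white_spaces_width_alt v =
      [((pvCanon v).length : Int), (PySem.List.max? (pvCanon v) (fun z => z)).getD 0] := by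
  unfold find_white_spaces_width_alt
  simp only
  -- step 1: the rep loop is the row-major fold of pvBStep
  have hrep :
      ((PySem.List.pyRange 0 (v.length : Int) 1).foldl (fun rep x =>
        (PySem.List.pyRange 0 ((v.headD []).length : Int) 1).foldl
          (fun (rep : PySem.Dict (Int × Int) (Int × Int)) y =>
            if pvAt v x y = 1 then
              [(x - 1, y), (x, y - 1)].foldl (fun rep2 n =>
                if 0 ≤ n.1 ∧ 0 ≤ n.2 ∧ pvAt v n.1 n.2 = 1 then
                  (if (rep2.get? (x, y)).getD (x, y) ≠ (rep2.get? n).getD n then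
                    pvRelabel rep2 ((rep2.get? (x, y)).getD (x, y)) ((rep2.get? n).getD n)
                  else rep2)
                else rep2) (rep.insert (x, y) (x, y))
            else rep) rep) (PySem.Dict.mk []))
      = (pvRmCells v).foldl (pvBStep v) (PySem.Dict.mk []) := by
    rw [pvFoldl_flatMap (PySem.List.pyRange 0 (v.length : Int) 1)
      (fun _ => PySem.List.pyRange 0 ((v.headD []).length : Int) 1)
      (fun rep x y =>
        if pvAt v x y = 1 then
          [(x - 1, y), (x, y - 1)].foldl (fun rep2 n =>
            if 0 ≤ n.1 ∧ 0 ≤ n.2 ∧ pvAt v n.1 n.2 = 1 then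
              (if (rep2.get? (x, y)).getD (x, y) ≠ (rep2.get? n).getD n then
                pvRelabel rep2 ((rep2.get? (x, y)).getD (x, y)) ((rep2.get? n).getD n)
              else rep2)
            else rep2) (rep.insert (x, y) (x, y))
        else rep)]
    rfl
  rw [hrep]
  set REP := (pvRmCells v).foldl (pvBStep v) (PySem.Dict.mk []) with hREP
  -- step 2: the sizes loop is a counter over the labels of the 1-cells
  have hsizes :
      ((PySem.List.pyRange 0 (v.length : Int) 1).foldl (fun s x =>
        (PySem.List.pyRange 0 ((v.headD []).length : Int) 1).foldl
          (fun (s : PySem.Dict (Int × Int) Int) y =>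
            if pvAt v x y = 1 then
              s.insert ((REP.get? (x, y)).getD (x, y))
                (s.getD ((REP.get? (x, y)).getD (x, y)) 0 + 1)
            else s) s) (PySem.Dict.mk []))
      = ((pvOnes v).map (pvF REP)).foldl
          (fun d x => d.insert x (d.getD x 0 + 1)) (PySem.Dict.mk []) := by
    rw [pvFoldl_flatMap (PySem.List.pyRange 0 (v.length : Int) 1)
      (fun _ => PySem.List.pyRange 0 ((v.headD []).length : Int) 1)
      (fun (s : PySem.Dict (Int × Int) Int) x y =>
        if pvAt v x y = 1 then
          s.insert ((REP.get? (x, y)).getD (x, y))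
            (s.getD ((REP.get? (x, y)).getD (x, y)) 0 + 1)
        else s)]
    rw [show (fun (s : PySem.Dict (Int × Int) Int) (p : Int × Int) =>
        if pvAt v p.1 p.2 = 1 then
          s.insert ((REP.get? (p.1, p.2)).getD (p.1, p.2))
            (s.getD ((REP.get? (p.1, p.2)).getD (p.1, p.2)) 0 + 1)
        else s)
      = (fun (s : PySem.Dict (Int × Int) Int) (p : Int × Int) =>
          if pvAt v p.1 p.2 = 1 then
            s.insert (pvF REP p) (s.getD (pvF REP p) 0 + 1)
          else s) from rfl]
    rw [show (List.flatMap (fun x => List.map (fun y => (x, y))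
        (PySem.List.pyRange 0 ((v.headD []).length : Int) 1))
        (PySem.List.pyRange 0 (v.length : Int) 1)) = pvRmCells v from rfl]
    rw [PySem.List.foldl_ite_eq_foldl_filter (fun p : Int × Int => pvAt v p.1 p.2 = 1)
      (fun (s : PySem.Dict (Int × Int) Int) (p : Int × Int) =>
        s.insert (pvF REP p) (s.getD (pvF REP p) 0 + 1)) (pvRmCells v) (PySem.Dict.mk [])]
    rw [List.foldl_map]
    rfl
  rw [hsizes]
  set SIZES : PySem.Dict (Int × Int) Int := ((pvOnes v).map (pvF REP)).foldl
    (fun d x => d.insert x (d.getD x 0 + 1)) (PySem.Dict.mk []) with hSIZES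
  -- step 3: keys and values of the counter
  have hkeys : SIZES.keys = PySem.Set.ofList ((pvOnes v).map (pvF REP)) := by
    rw [hSIZES, PySem.Dict.keys_foldl_insert ((pvOnes v).map (pvF REP))
      (fun d x => d.getD x 0 + 1) (PySem.Dict.mk [])]
    rw [PySem.Set.ofList_eq_foldl]
    rfl
  have hnodup : SIZES.keys.Nodup := by
    rw [hkeys]; exact PySem.Set.nodup_ofList _
  have hvalues : SIZES.values = SIZES.keys.map (fun k => SIZES.getD k 0) :=
    PySem.Dict.values_eq_map_keys SIZES hnodup 0
  have hgetD : ∀ k, SIZES.getD k 0 = (((pvOnes v).map (pvF REP)).count k : Int) := by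
    intro k
    rw [hSIZES, PySem.Dict.getD_foldl_insert_add_one ((pvOnes v).map (pvF REP))
      (PySem.Dict.mk []) k]
    have : (PySem.Dict.mk ([] : List ((Int × Int) × Int))).getD k 0 = 0 := rfl
    rw [this, zero_add]
  -- step 4: the keys are the first cells of the components, the counts the sizes
  have hofl : PySem.Set.ofList ((pvOnes v).map (pvF REP)) =
      ((pvOnes v).filter (pvFirstPred v)).map (pvF REP) :=
    pvOfList_first v (pvF REP) (pvB_rep_class v) (pvOnes v) [] (by simp)
  have hcounts : SIZES.values = pvCanon v := by
    rw [hvalues, hkeys, hofl, List.map_map, pvCanon_eq_canonOf]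
    unfold pvCanonOf
    apply List.map_congr_left
    intro p hp
    have hpones : p ∈ pvOnes v := List.mem_of_mem_filter hp
    simp only [Function.comp_apply]
    rw [hgetD (pvF REP p), pvCount_comp v (pvF REP) (pvB_rep_class v) p hpones]
  rw [hcounts]


-- ===== VERDICT (by name: the statement is the Claim_ definition above) =====
theorem find_white_spaces_width_spec : Claim_equal_find_white_spaces_width := by
  intro v _hdom _hpre
  unfold Spec_find_white_spaces_width
  rw [pvA_characterization v, pvB_characterization v]
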